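-- pv_equiv track=rewrite | github.com/javiercarpio57/Redes-Lab-2 | fletcher_checksum.py | sum_binary
-- ===== SOURCE A (Python) =====
-- def sum_binary(word1, word2):
--     res = ''
--     recargo = 0
--     for i in range(len(word1)):
--         pos = len(word1) - i - 1
--
--         suma = int(word1[pos]) + int(word2[pos]) + recargo
--         if(suma > 1):
--             recargo = 1
--         else:
--             recargo = 0
--
--         res = str(suma % 2) + res
--
--         if recargo == 1 and pos == 0:
--             res = sum_one (res)
--
--     return res
--
-- def sum_one(word):
--     res = ''
--     recargo = 1
--
--     for i in range(len(word)):
--         pos = len(word) - i - 1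
--         suma = int(word[pos]) + recargo
--
--         if suma > 1:
--             recargo = 1
--         else:
--             recargo = 0
--
--         res = str(suma % 2) + res
--     return res
-- ===== SOURCE B (Python) =====
-- def sum_binary(word1, word2):
--     n = len(word1)
--     if n == 0:
--         return ''
--     total = int(word1, 2) + int(word2, 2)
--     if total >= 2 ** n:
--         total = total % (2 ** n) + 1  # end-around carry
--     return format(total, '0{}b'.format(n))
-- ===== Notes on version B (the rewrite author's own statement) =====
-- stated objective: simpler
-- what changed: Replaces A's MSB-ward per-digit loop with carry flag plus the sum_one ripple helper by converting both words to integers, one addition, an arithmetic end-around-carry step, and fixed-width binary formatting.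
-- outside the precondition, e.g. on sum_binary('10', '101'): A returns '01', B returns '100'; on sum_binary('2', '0'): A returns '1', B raises ValueError
import Mathlib
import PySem

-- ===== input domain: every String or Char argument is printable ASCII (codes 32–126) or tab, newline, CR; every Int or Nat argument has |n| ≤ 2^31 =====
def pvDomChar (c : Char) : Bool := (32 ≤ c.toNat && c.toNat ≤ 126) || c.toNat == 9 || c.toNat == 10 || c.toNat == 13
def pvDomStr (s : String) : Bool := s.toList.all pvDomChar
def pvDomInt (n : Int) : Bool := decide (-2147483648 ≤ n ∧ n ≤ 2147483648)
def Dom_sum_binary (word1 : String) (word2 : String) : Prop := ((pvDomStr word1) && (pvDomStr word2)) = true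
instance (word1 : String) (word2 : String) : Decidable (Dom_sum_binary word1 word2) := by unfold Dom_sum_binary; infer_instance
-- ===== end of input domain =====

-- B replaces A's per-digit carry loop + sum_one helper by whole-word integer conversion,
-- one addition with an arithmetic end-around-carry step, and fixed-width formatting (objective: simpler).

-- ===== PORT A =====
-- int(c) for a single character (none = ValueError)
def chInt (c : Char) : Option Int := PySem.Int.ofStr? (String.ofList [c])

-- sum_one's loop: i runs 0..len-1, pos = len-i-1; here m = remaining iterations, pos = m-1
def soLoop (w : List Char) (m : Nat) (res : List Char) (recargo : Int) : List Char :=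
  match m with
  | 0 => res
  | Nat.succ p =>
    match w[p]? with          -- w[pos]; pos = m-1 is always a nonnegative in-range index here
    | none => []
    | some c =>
      match chInt c with
      | none => []            -- Python raises ValueError here (non-digit char)
      | some d =>
        let suma := d + recargo
        let recargo' : Int := if 1 < suma then 1 else 0
        let res' := (PySem.Int.toStr (PySem.Int.mod suma 2)).toList ++ res
        soLoop w p res' recargo'

def sumOne (w : List Char) : List Char := soLoop w w.length [] 1

-- sum_binary's loop, same indexing scheme: m = remaining iterations, pos = m-1
def sbLoop (w1 w2 : List Char) (m : Nat) (res : List Char) (recargo : Int) : List Char :=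
  match m with
  | 0 => res
  | Nat.succ p =>
    match w1[p]?, w2[p]? with
    | some c1, some c2 =>
      match chInt c1, chInt c2 with
      | some d1, some d2 =>
        let suma := d1 + d2 + recargo
        let recargo' : Int := if 1 < suma then 1 else 0
        let res' := (PySem.Int.toStr (PySem.Int.mod suma 2)).toList ++ res
        let res'' := if recargo' = 1 ∧ p = 0 then sumOne res' else res'
        sbLoop w1 w2 p res'' recargo'
      | _, _ => []            -- Python raises ValueError (non-digit char): outside Pre_
    | _, _ => []              -- Python raises IndexError (word2 shorter): outside Pre_

def sum_binary (word1 : String) (word2 : String) : String :=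
  String.ofList (sbLoop word1.toList word2.toList word1.toList.length [] 0)

-- ===== PORT B =====
-- int(s, 2), ported by hand: exact on the nonempty '0'/'1' strings Pre_ admits
def toInt2 (l : List Char) : Nat := l.foldl (fun a c => 2 * a + (if c = '1' then 1 else 0)) 0

-- format(v, '0{n}b'), ported by hand: exact for 0 ≤ v < 2^n (guaranteed under Pre_)
def fmtBin : Nat → Nat → List Char
  | 0, _ => []
  | Nat.succ k, v => fmtBin k (v / 2) ++ [if v % 2 = 1 then '1' else '0']

def sum_binary_alt (word1 : String) (word2 : String) : String :=
  let n := word1.toList.length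
  if n = 0 then "" else
  let total := toInt2 word1.toList + toInt2 word2.toList
  let total := if 2 ^ n ≤ total then total % 2 ^ n + 1 else total
  String.ofList (fmtBin n total)

-- ===== PRECONDITION & SPEC =====
-- Pre_ restricts to the checksum's natural domain: an empty word1 (A reads nothing and returns ''),
-- or equal-length '0'/'1' strings. Outside it A raises (word2 shorter, non-digit chars) or returns
-- accidental values B's int(word,2) cannot reproduce: it silently truncates a longer word2 to
-- word1's length and accepts digits 2-9 via per-char int() with a carry flag that is not a carry
-- value (B raises ValueError on those non-binary cases).
def Pre_sum_binary (word1 : String) (word2 : String) : Prop :=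
  word1.toList = [] ∨
  (word1.toList.length = word2.toList.length ∧
   word1.toList.all (fun c => "01".toList.contains c) = true ∧
   word2.toList.all (fun c => "01".toList.contains c) = true)
instance (word1 : String) (word2 : String) : Decidable (Pre_sum_binary word1 word2) := by
  unfold Pre_sum_binary; infer_instance

def pvWitness_sum_binary : String × String := ("101", "011")

def Spec_sum_binary (word1 : String) (word2 : String) (out : String) : Prop := out = sum_binary_alt word1 word2
instance (word1 : String) (word2 : String) (out : String) : Decidable (Spec_sum_binary word1 word2 out) := by unfold Spec_sum_binary; infer_instance

-- ===== CLAIM (what is proved, stated in full; the proofs are below) =====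
def Claim_equal_sum_binary : Prop := ∀ (word1 : String) (word2 : String), Dom_sum_binary word1 word2 → Pre_sum_binary word1 word2 → Spec_sum_binary word1 word2 (sum_binary word1 word2)

-- ===== LEMMAS AND PROOFS =====

def Bin (l : List Char) : Prop := ∀ c ∈ l, c = '0' ∨ c = '1'

theorem chInt_zero : chInt '0' = some 0 := by decide
theorem chInt_one : chInt '1' = some 1 := by decide

theorem toInt2_take_succ (l : List Char) (m : Nat) (h : m < l.length) :
    toInt2 (l.take (m + 1)) = 2 * toInt2 (l.take m) + (if l[m] = '1' then 1 else 0) := by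
  unfold toInt2
  rw [← List.take_concat_get (l := l) (i := m) (h := h), List.concat_eq_append, List.foldl_append]
  simp [List.foldl]

theorem fmtBin_two_mul_add (k a b : Nat) (hb : b < 2) :
    fmtBin (k + 1) (2 * a + b) = fmtBin k a ++ [if b = 1 then '1' else '0'] := by
  have h1 : (2 * a + b) / 2 = a := by omega
  have h2 : (2 * a + b) % 2 = b := by omega
  simp only [fmtBin, h1, h2]

theorem fmtBin_length (n v : Nat) : (fmtBin n v).length = n := by
  induction n generalizing v with
  | zero => simp [fmtBin]
  | succ k ih => simp [fmtBin, ih]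

theorem Bin_fmtBin (n v : Nat) : Bin (fmtBin n v) := by
  induction n generalizing v with
  | zero => intro c hc; simp [fmtBin] at hc
  | succ k ih =>
    intro c hc
    simp only [fmtBin, List.mem_append, List.mem_singleton] at hc
    rcases hc with hc | hc
    · exact ih _ c hc
    · subst hc; split_ifs <;> simp

theorem toInt2_fmtBin (n v : Nat) : toInt2 (fmtBin n v) = v % 2 ^ n := by
  induction n generalizing v with
  | zero => simp [fmtBin, toInt2, Nat.mod_one]
  | succ k ih =>
    have hmm : v % 2 ^ (k + 1) = 2 * (v / 2 % 2 ^ k) + v % 2 := by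
      have h2 := Nat.div_add_mod v 2
      have h3 := Nat.div_add_mod (v / 2) (2 ^ k)
      have h4 : v / 2 % 2 ^ k < 2 ^ k := Nat.mod_lt _ (Nat.two_pow_pos k)
      have h5 : 2 ^ (k + 1) = 2 ^ k * 2 := by ring
      have h6 : 2 ^ (k + 1) * (v / 2 / 2 ^ k) = 2 * (2 ^ k * (v / 2 / 2 ^ k)) := by ring
      calc v % 2 ^ (k + 1)
          = (2 * (v / 2 % 2 ^ k) + v % 2 + 2 ^ (k + 1) * (v / 2 / 2 ^ k)) % 2 ^ (k + 1) := by
            congr 1; omega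
        _ = (2 * (v / 2 % 2 ^ k) + v % 2) % 2 ^ (k + 1) := by rw [Nat.add_mul_mod_self_left]
        _ = 2 * (v / 2 % 2 ^ k) + v % 2 := Nat.mod_eq_of_lt (by rw [h5]; omega)
    simp only [fmtBin, toInt2, List.foldl_append]
    rw [hmm]
    have : (fmtBin k (v / 2)).foldl (fun a c => 2 * a + if c = '1' then 1 else 0) 0 = v / 2 % 2 ^ k := ih (v / 2)
    simp only [List.foldl, this]
    rcases Nat.mod_two_eq_zero_or_one v with h | h <;> simp [h]

theorem fmtBin_double (k a : Nat) : fmtBin (k + 1) (2 * a) = fmtBin k a ++ ['0'] := by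
  have h := fmtBin_two_mul_add k a 0 (by norm_num)
  simpa using h

theorem fmtBin_double_add_one (k a : Nat) : fmtBin (k + 1) (2 * a + 1) = fmtBin k a ++ ['1'] := by
  have h := fmtBin_two_mul_add k a 1 (by norm_num)
  simpa using h

theorem fmtBin_double_add_two (k a : Nat) : fmtBin (k + 1) (2 * a + 2) = fmtBin k (a + 1) ++ ['0'] := by
  have h := fmtBin_two_mul_add k (a + 1) 0 (by norm_num)
  have e : 2 * (a + 1) + 0 = 2 * a + 2 := by ring
  rw [e] at h
  simpa using h

theorem soLoop_step (w : List Char) (p : Nat) (res : List Char) (r d : Int) (c : Char)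
    (hp : p < w.length) (hcw : w[p] = c) (hchi : chInt c = some d) :
    soLoop w (p + 1) res r =
      soLoop w p ((PySem.Int.toStr (PySem.Int.mod (d + r) 2)).toList ++ res)
        (if 1 < d + r then 1 else 0) := by
  conv_lhs => rw [soLoop]
  rw [List.getElem?_eq_getElem hp, hcw]
  simp only [hchi]

theorem soLoop_eq (m : Nat) : ∀ (w res : List Char) (r : Int), Bin w → m ≤ w.length →
    (r = 0 ∨ r = 1) →
    soLoop w m res r = fmtBin m (toInt2 (w.take m) + r.toNat) ++ res := by
  induction m with
  | zero => intro w res r _ _ _; simp [soLoop, fmtBin]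
  | succ p ih =>
    intro w res r hb hm hr
    have hp : p < w.length := hm
    have hple : p ≤ w.length := le_of_lt hp
    have ht := toInt2_take_succ w p hp
    rcases hb w[p] (List.getElem_mem hp) with hc | hc <;> rcases hr with hr | hr <;> subst hr
    · rw [soLoop_step w p res 0 0 '0' hp hc chInt_zero]
      have h2 : (PySem.Int.toStr (PySem.Int.mod ((0:Int) + (0:Int)) 2)).toList = ['0'] := by decide
      have h1 : (if (1:Int) < 0 + 0 then (1:Int) else 0) = 0 := by norm_num
      rw [h2, h1, ih w _ 0 hb hple (Or.inl rfl), ht, hc]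
      simp [fmtBin_double]
    · rw [soLoop_step w p res 1 0 '0' hp hc chInt_zero]
      have h2 : (PySem.Int.toStr (PySem.Int.mod ((0:Int) + (1:Int)) 2)).toList = ['1'] := by decide
      have h1 : (if (1:Int) < 0 + 1 then (1:Int) else 0) = 0 := by norm_num
      rw [h2, h1, ih w _ 0 hb hple (Or.inl rfl), ht, hc]
      simp [fmtBin_double_add_one]
    · rw [soLoop_step w p res 0 1 '1' hp hc chInt_one]
      have h2 : (PySem.Int.toStr (PySem.Int.mod ((1:Int) + (0:Int)) 2)).toList = ['1'] := by decide
      have h1 : (if (1:Int) < 1 + 0 then (1:Int) else 0) = 0 := by norm_num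
      rw [h2, h1, ih w _ 0 hb hple (Or.inl rfl), ht, hc]
      simp [fmtBin_double_add_one]
    · rw [soLoop_step w p res 1 1 '1' hp hc chInt_one]
      have h2 : (PySem.Int.toStr (PySem.Int.mod ((1:Int) + (1:Int)) 2)).toList = ['0'] := by decide
      have h1 : (if (1:Int) < 1 + 1 then (1:Int) else 0) = 1 := by norm_num
      rw [h2, h1, ih w _ 1 hb hple (Or.inr rfl), ht, hc]
      have e : 2 * toInt2 (w.take p) + (if '1' = '1' then 1 else 0) + (1:Int).toNat = 2 * toInt2 (w.take p) + 2 := by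
        simp
      rw [e, fmtBin_double_add_two]
      simp

theorem sumOne_eq (w : List Char) (hb : Bin w) :
    sumOne w = fmtBin w.length (toInt2 w + 1) := by
  have h := soLoop_eq w.length w [] 1 hb le_rfl (Or.inr rfl)
  simpa [sumOne, List.take_length] using h

theorem Bin_cons (c : Char) (res : List Char) (hc : c = '0' ∨ c = '1') (h : Bin res) :
    Bin (c :: res) := by
  intro x hx
  rcases List.mem_cons.mp hx with rfl | hx
  · exact hc
  · exact h x hx

theorem sb_main_step (p s' b : Nat) (hb : b < 2) (res : List Char) :
    (if 2 ^ (p + 1) ≤ 2 * s' + b then sumOne (fmtBin (p + 1) (2 * s' + b) ++ res)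
     else fmtBin (p + 1) (2 * s' + b) ++ res)
    = (if 2 ^ p ≤ s' then sumOne (fmtBin p s' ++ ((if b = 1 then '1' else '0') :: res))
       else fmtBin p s' ++ (if b = 1 then '1' else '0') :: res) := by
  have hiff : 2 ^ (p + 1) ≤ 2 * s' + b ↔ 2 ^ p ≤ s' := by rw [pow_succ]; omega
  rw [fmtBin_two_mul_add p s' b hb]
  by_cases hle : 2 ^ p ≤ s'
  · rw [if_pos (hiff.mpr hle), if_pos hle]; simp
  · rw [if_neg (fun h => hle (hiff.mp h)), if_neg hle]; simp

theorem sbLoop_step (w1 w2 : List Char) (p : Nat) (res : List Char) (r d1 d2 : Int) (c1 c2 : Char)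
    (hp1 : p < w1.length) (hp2 : p < w2.length) (h1 : w1[p] = c1) (h2 : w2[p] = c2)
    (hi1 : chInt c1 = some d1) (hi2 : chInt c2 = some d2) :
    sbLoop w1 w2 (p + 1) res r =
      sbLoop w1 w2 p
        (if (if 1 < d1 + d2 + r then (1:Int) else 0) = 1 ∧ p = 0
         then sumOne ((PySem.Int.toStr (PySem.Int.mod (d1 + d2 + r) 2)).toList ++ res)
         else (PySem.Int.toStr (PySem.Int.mod (d1 + d2 + r) 2)).toList ++ res)
        (if 1 < d1 + d2 + r then 1 else 0) := by
  conv_lhs => rw [sbLoop]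
  rw [List.getElem?_eq_getElem hp1, List.getElem?_eq_getElem hp2, h1, h2]
  simp only [hi1, hi2]

theorem sbLoop_eq (m : Nat) : ∀ (w1 w2 res : List Char) (r : Int), Bin w1 → Bin w2 → Bin res →
    1 ≤ m → m ≤ w1.length → m ≤ w2.length → (r = 0 ∨ r = 1) →
    sbLoop w1 w2 m res r =
      (if 2 ^ m ≤ toInt2 (w1.take m) + toInt2 (w2.take m) + r.toNat
       then sumOne (fmtBin m (toInt2 (w1.take m) + toInt2 (w2.take m) + r.toNat) ++ res)
       else fmtBin m (toInt2 (w1.take m) + toInt2 (w2.take m) + r.toNat) ++ res) := by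
  induction m with
  | zero => intro w1 w2 res r _ _ _ h1 _ _ _; omega
  | succ p ih =>
    intro w1 w2 res r hb1 hb2 hres _ hm1 hm2 hr
    have hp1 : p < w1.length := hm1
    have hp2 : p < w2.length := hm2
    rcases hb1 w1[p] (List.getElem_mem hp1) with hc1 | hc1 <;>
      rcases hb2 w2[p] (List.getElem_mem hp2) with hc2 | hc2 <;> rcases hr with hr | hr <;> subst hr
    · -- c1='0', c2='0', r=0
      rw [sbLoop_step w1 w2 p res 0 0 0 '0' '0' hp1 hp2 hc1 hc2 chInt_zero chInt_zero]
      have hstr : (PySem.Int.toStr (PySem.Int.mod ((0:Int) + 0 + 0) 2)).toList = ['0'] := by decide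
      have hrc : (if (1:Int) < (0:Int) + 0 + 0 then (1:Int) else 0) = 0 := by norm_num
      have hrn : ((0:Int)).toNat = 0 := rfl
      rw [hstr, hrc]
      by_cases hp0 : p = 0
      · subst hp0
        have e1 : toInt2 (w1.take 1) = 0 := by
          rw [toInt2_take_succ w1 0 hp1, hc1]; simp [toInt2]
        have e2 : toInt2 (w2.take 1) = 0 := by
          rw [toInt2_take_succ w2 0 hp2, hc2]; simp [toInt2]
        rw [e1, e2, hrn]
        rw [if_neg (by decide)]
        conv_lhs => rw [sbLoop]
        rw [if_neg (by norm_num : ¬ 2 ^ 1 ≤ 0 + 0 + 0)]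
        have hf : fmtBin 1 (0 + 0 + 0) = ['0'] := by decide
        rw [hf]
      · have hq : 1 ≤ p := Nat.one_le_iff_ne_zero.mpr hp0
        rw [if_neg (by simp [hp0]), List.singleton_append]
        rw [ih w1 w2 ('0' :: res) 0 hb1 hb2 (Bin_cons _ _ (by simp) hres) hq (le_of_lt hp1) (le_of_lt hp2) (by norm_num)]
        rw [toInt2_take_succ w1 p hp1, toInt2_take_succ w2 p hp2, hc1, hc2]
        simp only [Char.reduceEq, reduceIte, Int.toNat_zero]
        have e : 2 * toInt2 (w1.take p) + 0 + (2 * toInt2 (w2.take p) + 0) + 0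
            = 2 * (toInt2 (w1.take p) + toInt2 (w2.take p) + 0) + 0 := by ring
        rw [e, sb_main_step p (toInt2 (w1.take p) + toInt2 (w2.take p) + 0) 0 (by norm_num) res]
        simp
    · -- c1='0', c2='0', r=1
      rw [sbLoop_step w1 w2 p res 1 0 0 '0' '0' hp1 hp2 hc1 hc2 chInt_zero chInt_zero]
      have hstr : (PySem.Int.toStr (PySem.Int.mod ((0:Int) + 0 + 1) 2)).toList = ['1'] := by decide
      have hrc : (if (1:Int) < (0:Int) + 0 + 1 then (1:Int) else 0) = 0 := by norm_num
      have hrn : ((1:Int)).toNat = 1 := rfl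
      rw [hstr, hrc]
      by_cases hp0 : p = 0
      · subst hp0
        have e1 : toInt2 (w1.take 1) = 0 := by
          rw [toInt2_take_succ w1 0 hp1, hc1]; simp [toInt2]
        have e2 : toInt2 (w2.take 1) = 0 := by
          rw [toInt2_take_succ w2 0 hp2, hc2]; simp [toInt2]
        rw [e1, e2, hrn]
        rw [if_neg (by decide)]
        conv_lhs => rw [sbLoop]
        rw [if_neg (by norm_num : ¬ 2 ^ 1 ≤ 0 + 0 + 1)]
        have hf : fmtBin 1 (0 + 0 + 1) = ['1'] := by decide
        rw [hf]
      · have hq : 1 ≤ p := Nat.one_le_iff_ne_zero.mpr hp0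
        rw [if_neg (by simp [hp0]), List.singleton_append]
        rw [ih w1 w2 ('1' :: res) 0 hb1 hb2 (Bin_cons _ _ (by simp) hres) hq (le_of_lt hp1) (le_of_lt hp2) (by norm_num)]
        rw [toInt2_take_succ w1 p hp1, toInt2_take_succ w2 p hp2, hc1, hc2]
        simp only [Char.reduceEq, reduceIte, Int.toNat_zero, Int.toNat_one]
        have e : 2 * toInt2 (w1.take p) + 0 + (2 * toInt2 (w2.take p) + 0) + 1
            = 2 * (toInt2 (w1.take p) + toInt2 (w2.take p) + 0) + 1 := by ring
        rw [e, sb_main_step p (toInt2 (w1.take p) + toInt2 (w2.take p) + 0) 1 (by norm_num) res]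
        simp
    · -- c1='0', c2='1', r=0
      rw [sbLoop_step w1 w2 p res 0 0 1 '0' '1' hp1 hp2 hc1 hc2 chInt_zero chInt_one]
      have hstr : (PySem.Int.toStr (PySem.Int.mod ((0:Int) + 1 + 0) 2)).toList = ['1'] := by decide
      have hrc : (if (1:Int) < (0:Int) + 1 + 0 then (1:Int) else 0) = 0 := by norm_num
      have hrn : ((0:Int)).toNat = 0 := rfl
      rw [hstr, hrc]
      by_cases hp0 : p = 0
      · subst hp0
        have e1 : toInt2 (w1.take 1) = 0 := by
          rw [toInt2_take_succ w1 0 hp1, hc1]; simp [toInt2]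
        have e2 : toInt2 (w2.take 1) = 1 := by
          rw [toInt2_take_succ w2 0 hp2, hc2]; simp [toInt2]
        rw [e1, e2, hrn]
        rw [if_neg (by decide)]
        conv_lhs => rw [sbLoop]
        rw [if_neg (by norm_num : ¬ 2 ^ 1 ≤ 0 + 1 + 0)]
        have hf : fmtBin 1 (0 + 1 + 0) = ['1'] := by decide
        rw [hf]
      · have hq : 1 ≤ p := Nat.one_le_iff_ne_zero.mpr hp0
        rw [if_neg (by simp [hp0]), List.singleton_append]
        rw [ih w1 w2 ('1' :: res) 0 hb1 hb2 (Bin_cons _ _ (by simp) hres) hq (le_of_lt hp1) (le_of_lt hp2) (by norm_num)]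
        rw [toInt2_take_succ w1 p hp1, toInt2_take_succ w2 p hp2, hc1, hc2]
        simp only [Char.reduceEq, reduceIte, Int.toNat_zero]
        have e : 2 * toInt2 (w1.take p) + 0 + (2 * toInt2 (w2.take p) + 1) + 0
            = 2 * (toInt2 (w1.take p) + toInt2 (w2.take p) + 0) + 1 := by ring
        rw [e, sb_main_step p (toInt2 (w1.take p) + toInt2 (w2.take p) + 0) 1 (by norm_num) res]
        simp
    · -- c1='0', c2='1', r=1
      rw [sbLoop_step w1 w2 p res 1 0 1 '0' '1' hp1 hp2 hc1 hc2 chInt_zero chInt_one]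
      have hstr : (PySem.Int.toStr (PySem.Int.mod ((0:Int) + 1 + 1) 2)).toList = ['0'] := by decide
      have hrc : (if (1:Int) < (0:Int) + 1 + 1 then (1:Int) else 0) = 1 := by norm_num
      have hrn : ((1:Int)).toNat = 1 := rfl
      rw [hstr, hrc]
      by_cases hp0 : p = 0
      · subst hp0
        have e1 : toInt2 (w1.take 1) = 0 := by
          rw [toInt2_take_succ w1 0 hp1, hc1]; simp [toInt2]
        have e2 : toInt2 (w2.take 1) = 1 := by
          rw [toInt2_take_succ w2 0 hp2, hc2]; simp [toInt2]
        rw [e1, e2, hrn]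
        rw [if_pos (by decide : (1:Int) = 1 ∧ (0:Nat) = 0)]
        conv_lhs => rw [sbLoop]
        rw [if_pos (by norm_num : 2 ^ 1 ≤ 0 + 1 + 1)]
        have hf : fmtBin 1 (0 + 1 + 1) = ['0'] := by decide
        rw [hf]
      · have hq : 1 ≤ p := Nat.one_le_iff_ne_zero.mpr hp0
        rw [if_neg (by simp [hp0]), List.singleton_append]
        rw [ih w1 w2 ('0' :: res) 1 hb1 hb2 (Bin_cons _ _ (by simp) hres) hq (le_of_lt hp1) (le_of_lt hp2) (by norm_num)]
        rw [toInt2_take_succ w1 p hp1, toInt2_take_succ w2 p hp2, hc1, hc2]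
        simp only [Char.reduceEq, reduceIte, Int.toNat_one]
        have e : 2 * toInt2 (w1.take p) + 0 + (2 * toInt2 (w2.take p) + 1) + 1
            = 2 * (toInt2 (w1.take p) + toInt2 (w2.take p) + 1) + 0 := by ring
        rw [e, sb_main_step p (toInt2 (w1.take p) + toInt2 (w2.take p) + 1) 0 (by norm_num) res]
        simp
    · -- c1='1', c2='0', r=0
      rw [sbLoop_step w1 w2 p res 0 1 0 '1' '0' hp1 hp2 hc1 hc2 chInt_one chInt_zero]
      have hstr : (PySem.Int.toStr (PySem.Int.mod ((1:Int) + 0 + 0) 2)).toList = ['1'] := by decide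
      have hrc : (if (1:Int) < (1:Int) + 0 + 0 then (1:Int) else 0) = 0 := by norm_num
      have hrn : ((0:Int)).toNat = 0 := rfl
      rw [hstr, hrc]
      by_cases hp0 : p = 0
      · subst hp0
        have e1 : toInt2 (w1.take 1) = 1 := by
          rw [toInt2_take_succ w1 0 hp1, hc1]; simp [toInt2]
        have e2 : toInt2 (w2.take 1) = 0 := by
          rw [toInt2_take_succ w2 0 hp2, hc2]; simp [toInt2]
        rw [e1, e2, hrn]
        rw [if_neg (by decide)]
        conv_lhs => rw [sbLoop]
        rw [if_neg (by norm_num : ¬ 2 ^ 1 ≤ 1 + 0 + 0)]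
        have hf : fmtBin 1 (1 + 0 + 0) = ['1'] := by decide
        rw [hf]
      · have hq : 1 ≤ p := Nat.one_le_iff_ne_zero.mpr hp0
        rw [if_neg (by simp [hp0]), List.singleton_append]
        rw [ih w1 w2 ('1' :: res) 0 hb1 hb2 (Bin_cons _ _ (by simp) hres) hq (le_of_lt hp1) (le_of_lt hp2) (by norm_num)]
        rw [toInt2_take_succ w1 p hp1, toInt2_take_succ w2 p hp2, hc1, hc2]
        simp only [Char.reduceEq, reduceIte, Int.toNat_zero]
        have e : 2 * toInt2 (w1.take p) + 1 + (2 * toInt2 (w2.take p) + 0) + 0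
            = 2 * (toInt2 (w1.take p) + toInt2 (w2.take p) + 0) + 1 := by ring
        rw [e, sb_main_step p (toInt2 (w1.take p) + toInt2 (w2.take p) + 0) 1 (by norm_num) res]
        simp
    · -- c1='1', c2='0', r=1
      rw [sbLoop_step w1 w2 p res 1 1 0 '1' '0' hp1 hp2 hc1 hc2 chInt_one chInt_zero]
      have hstr : (PySem.Int.toStr (PySem.Int.mod ((1:Int) + 0 + 1) 2)).toList = ['0'] := by decide
      have hrc : (if (1:Int) < (1:Int) + 0 + 1 then (1:Int) else 0) = 1 := by norm_num
      have hrn : ((1:Int)).toNat = 1 := rfl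
      rw [hstr, hrc]
      by_cases hp0 : p = 0
      · subst hp0
        have e1 : toInt2 (w1.take 1) = 1 := by
          rw [toInt2_take_succ w1 0 hp1, hc1]; simp [toInt2]
        have e2 : toInt2 (w2.take 1) = 0 := by
          rw [toInt2_take_succ w2 0 hp2, hc2]; simp [toInt2]
        rw [e1, e2, hrn]
        rw [if_pos (by decide : (1:Int) = 1 ∧ (0:Nat) = 0)]
        conv_lhs => rw [sbLoop]
        rw [if_pos (by norm_num : 2 ^ 1 ≤ 1 + 0 + 1)]
        have hf : fmtBin 1 (1 + 0 + 1) = ['0'] := by decide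
        rw [hf]
      · have hq : 1 ≤ p := Nat.one_le_iff_ne_zero.mpr hp0
        rw [if_neg (by simp [hp0]), List.singleton_append]
        rw [ih w1 w2 ('0' :: res) 1 hb1 hb2 (Bin_cons _ _ (by simp) hres) hq (le_of_lt hp1) (le_of_lt hp2) (by norm_num)]
        rw [toInt2_take_succ w1 p hp1, toInt2_take_succ w2 p hp2, hc1, hc2]
        simp only [Char.reduceEq, reduceIte, Int.toNat_one]
        have e : 2 * toInt2 (w1.take p) + 1 + (2 * toInt2 (w2.take p) + 0) + 1
            = 2 * (toInt2 (w1.take p) + toInt2 (w2.take p) + 1) + 0 := by ring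
        rw [e, sb_main_step p (toInt2 (w1.take p) + toInt2 (w2.take p) + 1) 0 (by norm_num) res]
        simp
    · -- c1='1', c2='1', r=0
      rw [sbLoop_step w1 w2 p res 0 1 1 '1' '1' hp1 hp2 hc1 hc2 chInt_one chInt_one]
      have hstr : (PySem.Int.toStr (PySem.Int.mod ((1:Int) + 1 + 0) 2)).toList = ['0'] := by decide
      have hrc : (if (1:Int) < (1:Int) + 1 + 0 then (1:Int) else 0) = 1 := by norm_num
      have hrn : ((0:Int)).toNat = 0 := rfl
      rw [hstr, hrc]
      by_cases hp0 : p = 0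
      · subst hp0
        have e1 : toInt2 (w1.take 1) = 1 := by
          rw [toInt2_take_succ w1 0 hp1, hc1]; simp [toInt2]
        have e2 : toInt2 (w2.take 1) = 1 := by
          rw [toInt2_take_succ w2 0 hp2, hc2]; simp [toInt2]
        rw [e1, e2, hrn]
        rw [if_pos (by decide : (1:Int) = 1 ∧ (0:Nat) = 0)]
        conv_lhs => rw [sbLoop]
        rw [if_pos (by norm_num : 2 ^ 1 ≤ 1 + 1 + 0)]
        have hf : fmtBin 1 (1 + 1 + 0) = ['0'] := by decide
        rw [hf]
      · have hq : 1 ≤ p := Nat.one_le_iff_ne_zero.mpr hp0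
        rw [if_neg (by simp [hp0]), List.singleton_append]
        rw [ih w1 w2 ('0' :: res) 1 hb1 hb2 (Bin_cons _ _ (by simp) hres) hq (le_of_lt hp1) (le_of_lt hp2) (by norm_num)]
        rw [toInt2_take_succ w1 p hp1, toInt2_take_succ w2 p hp2, hc1, hc2]
        simp only [reduceIte, Int.toNat_zero, Int.toNat_one]
        have e : 2 * toInt2 (w1.take p) + 1 + (2 * toInt2 (w2.take p) + 1) + 0
            = 2 * (toInt2 (w1.take p) + toInt2 (w2.take p) + 1) + 0 := by ring
        rw [e, sb_main_step p (toInt2 (w1.take p) + toInt2 (w2.take p) + 1) 0 (by norm_num) res]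
        simp
    · -- c1='1', c2='1', r=1
      rw [sbLoop_step w1 w2 p res 1 1 1 '1' '1' hp1 hp2 hc1 hc2 chInt_one chInt_one]
      have hstr : (PySem.Int.toStr (PySem.Int.mod ((1:Int) + 1 + 1) 2)).toList = ['1'] := by decide
      have hrc : (if (1:Int) < (1:Int) + 1 + 1 then (1:Int) else 0) = 1 := by norm_num
      have hrn : ((1:Int)).toNat = 1 := rfl
      rw [hstr, hrc]
      by_cases hp0 : p = 0
      · subst hp0
        have e1 : toInt2 (w1.take 1) = 1 := by
          rw [toInt2_take_succ w1 0 hp1, hc1]; simp [toInt2]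
        have e2 : toInt2 (w2.take 1) = 1 := by
          rw [toInt2_take_succ w2 0 hp2, hc2]; simp [toInt2]
        rw [e1, e2, hrn]
        rw [if_pos (by decide : (1:Int) = 1 ∧ (0:Nat) = 0)]
        conv_lhs => rw [sbLoop]
        rw [if_pos (by norm_num : 2 ^ 1 ≤ 1 + 1 + 1)]
        have hf : fmtBin 1 (1 + 1 + 1) = ['1'] := by decide
        rw [hf]
      · have hq : 1 ≤ p := Nat.one_le_iff_ne_zero.mpr hp0
        rw [if_neg (by simp [hp0]), List.singleton_append]
        rw [ih w1 w2 ('1' :: res) 1 hb1 hb2 (Bin_cons _ _ (by simp) hres) hq (le_of_lt hp1) (le_of_lt hp2) (by norm_num)]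
        rw [toInt2_take_succ w1 p hp1, toInt2_take_succ w2 p hp2, hc1, hc2]
        simp only [reduceIte, Int.toNat_one]
        have e : 2 * toInt2 (w1.take p) + 1 + (2 * toInt2 (w2.take p) + 1) + 1
            = 2 * (toInt2 (w1.take p) + toInt2 (w2.take p) + 1) + 1 := by ring
        rw [e, sb_main_step p (toInt2 (w1.take p) + toInt2 (w2.take p) + 1) 1 (by norm_num) res]
        simp

-- ===== VERDICT (by name: the statement is the Claim_ definition above) =====
theorem sum_binary_spec : Claim_equal_sum_binary := by
  intro w1 w2 _ hpre
  unfold Spec_sum_binary sum_binary sum_binary_alt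
  by_cases hemp : w1.toList = []
  · have hl0 : w1.toList.length = 0 := by simpa using congrArg List.length hemp
    simp only [hl0, sbLoop, reduceIte]
  · obtain ⟨hlen, hb1', hb2'⟩ := hpre.resolve_left hemp
    have hb1 : Bin w1.toList := by
      intro c hc
      have h := List.all_eq_true.mp hb1' c hc
      rw [show "01".toList = ['0', '1'] from rfl] at h
      simp [List.contains_eq_mem, List.mem_cons] at h
      tauto
    have hb2 : Bin w2.toList := by
      intro c hc
      have h := List.all_eq_true.mp hb2' c hc
      rw [show "01".toList = ['0', '1'] from rfl] at h
      simp [List.contains_eq_mem, List.mem_cons] at h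
      tauto
    have hn1 : 1 ≤ w1.toList.length := by
      have := List.length_pos_iff.mpr hemp
      omega
    have htk2 : w2.toList.take w1.toList.length = w2.toList := by
      rw [hlen, List.take_length]
    rw [sbLoop_eq w1.toList.length w1.toList w2.toList [] 0 hb1 hb2
        (by intro c hc; simp at hc) hn1 le_rfl (le_of_eq hlen) (Or.inl rfl),
        if_neg (by omega : ¬ w1.toList.length = 0)]
    simp only [List.take_length, htk2, Int.toNat_zero, List.append_nil, add_zero]
    by_cases hcarry : 2 ^ w1.toList.length ≤ toInt2 w1.toList + toInt2 w2.toList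
    · rw [if_pos hcarry, if_pos hcarry]
      rw [sumOne_eq _ (Bin_fmtBin _ _), fmtBin_length, toInt2_fmtBin]
    · rw [if_neg hcarry, if_neg hcarry]
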